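-- pv_equiv track=rewrite | github.com/bjwyse/mq_compress | mq_compress.py | encodeNumber
-- ===== SOURCE A (Python) =====
-- def encodeNumber(num):
--    num = num << 1
--    if (num < 0):
--       num = ~(num)
--
--    encoded = ''
--    while (num >= 0x20):
--       encoded += chr((0x20 | (num & 0x1f)) + 63)
--       num >>= 5
--
--    encoded += chr(num + 63)
--    return encoded
-- ===== SOURCE B (Python) =====
-- def encodeNumber(num):
--     z = num << 1
--     if z < 0:
--         z = ~z
--     k = max(1, (z.bit_length() + 4) // 5)
--     return ''.join(chr(((z >> (5 * i)) & 0x1f) + (63 if i == k - 1 else 95))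
--                    for i in range(k))
-- ===== Notes on version B (the rewrite author's own statement) =====
-- stated objective: alternative
-- what changed: B computes the digit count k in closed form from bit_length instead of A's destructive shift loop, then extracts each 5-bit group by indexed shift (z >> 5*i) & 0x1f and adds 95 (continuation) or 63 (last) arithmetically, joining over range(k); no mutation of z and no per-digit while loop.
import Mathlib
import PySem

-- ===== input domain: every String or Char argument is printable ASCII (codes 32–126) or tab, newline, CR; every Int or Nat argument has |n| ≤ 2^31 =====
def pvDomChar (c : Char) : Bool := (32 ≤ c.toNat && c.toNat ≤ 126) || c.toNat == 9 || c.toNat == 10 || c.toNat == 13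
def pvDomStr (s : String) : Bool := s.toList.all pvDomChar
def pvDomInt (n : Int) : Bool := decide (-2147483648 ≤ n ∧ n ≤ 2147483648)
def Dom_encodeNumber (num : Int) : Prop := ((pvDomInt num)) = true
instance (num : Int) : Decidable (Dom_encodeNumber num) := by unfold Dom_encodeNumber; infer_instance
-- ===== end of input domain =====

-- B derives the digit count in closed form from bit_length and extracts each 5-bit group by indexed shifts, instead of A's destructive shift loop (objective: alternative).


-- ===== PORT A =====
-- A's while loop: emit chr((0x20 | (num & 0x1f)) + 63) and shift, until num < 0x20; then the final char.
def encAHelp (n : Nat) : List Char :=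
  if 32 ≤ n then
    Char.ofNat ((32 ||| (n &&& 31)) + 63) :: encAHelp (n >>> 5)
  else
    [Char.ofNat (n + 63)]
decreasing_by
  simp only [Nat.shiftRight_eq_div_pow]
  exact Nat.div_lt_self (by omega) (by norm_num)

def encodeNumber (num : Int) : String :=
  let n := num <<< 1
  let n := if n < 0 then ~~~n else n
  String.ofList (encAHelp n.toNat)

-- ===== PORT B =====
-- Python's int.bit_length on a nonnegative value
def bitLen (n : Nat) : Nat := if n = 0 then 0 else Nat.log2 n + 1

def encodeNumber_alt (num : Int) : String :=
  let z := num <<< 1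
  let z := if z < 0 then ~~~z else z
  let n := z.toNat
  let k := max 1 ((bitLen n + 4) / 5)
  String.ofList ((List.range k).map
    (fun i => Char.ofNat (((n >>> (5 * i)) &&& 31) + (if i = k - 1 then 63 else 95))))

-- ===== PRECONDITION & SPEC =====
def Spec_encodeNumber (num : Int) (out : String) : Prop := out = encodeNumber_alt num
instance (num : Int) (out : String) : Decidable (Spec_encodeNumber num out) := by unfold Spec_encodeNumber; infer_instance

-- ===== CLAIM (what is proved, stated in full; the proofs are below) =====
def Claim_equal_encodeNumber : Prop := ∀ (num : Int), Dom_encodeNumber num → Spec_encodeNumber num (encodeNumber num)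


-- ===== LEMMAS AND PROOFS =====
theorem and31_eq_mod (n : Nat) : n &&& 31 = n % 32 := by
  have h := Nat.and_two_pow_sub_one_eq_mod n 5
  norm_num at h; exact h

theorem or32_eq_add (a : Nat) (h : a < 32) : 32 ||| a = 32 + a := by
  have h2 := Nat.two_pow_add_eq_or_of_lt (i := 5) (by omega : a < 2 ^ 5) 1
  norm_num at h2; omega

theorem log2_shift5 (n : Nat) : Nat.log2 (n >>> 5) = Nat.log2 n - 5 := by
  simp only [Nat.shiftRight_eq_div_pow]
  rw [show (2 : Nat) ^ 5 = 2 * 2 * 2 * 2 * 2 by norm_num,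
    ← Nat.div_div_eq_div_mul, ← Nat.div_div_eq_div_mul,
    ← Nat.div_div_eq_div_mul, ← Nat.div_div_eq_div_mul]
  simp only [Nat.log2_eq_log_two, Nat.log_div_base]
  omega

theorem encAHelp_eq (n : Nat) :
    encAHelp n = (List.range (max 1 ((bitLen n + 4) / 5))).map
      (fun i => Char.ofNat (((n >>> (5 * i)) &&& 31) +
        (if i = max 1 ((bitLen n + 4) / 5) - 1 then 63 else 95))) := by
  induction n using Nat.strong_induction_on with
  | _ n ih =>
    by_cases h : 32 ≤ n
    · -- n ≥ 32: one continuation digit, then the digits of n >>> 5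
      have hL5 : 5 ≤ Nat.log2 n := by rw [Nat.le_log2 (by omega)]; omega
      have hsh : n >>> 5 = n / 32 := by
        simp [Nat.shiftRight_eq_div_pow]
      have hns0 : n >>> 5 ≠ 0 := by rw [hsh]; omega
      have hbl : bitLen n = Nat.log2 n + 1 := by
        unfold bitLen; rw [if_neg (by omega)]
      have hbl2 : bitLen (n >>> 5) = Nat.log2 n - 4 := by
        unfold bitLen; rw [if_neg hns0, log2_shift5]; omega
      have hKn : max 1 ((bitLen n + 4) / 5) = Nat.log2 n / 5 + 1 := by
        rw [hbl]; omega
      have hKs : max 1 ((bitLen (n >>> 5) + 4) / 5) = Nat.log2 n / 5 := by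
        rw [hbl2]; omega
      have hq1 : 1 ≤ Nat.log2 n / 5 := by omega
      have hlt : n >>> 5 < n := by
        rw [hsh]; exact Nat.div_lt_self (by omega) (by norm_num)
      unfold encAHelp
      rw [if_pos h, ih (n >>> 5) hlt, hKs, hKn]
      rw [List.range_succ_eq_map]
      simp only [List.map_cons, List.map_map]
      refine congrArg₂ List.cons ?_ ?_
      · -- head character
        have ha : n &&& 31 < 32 := by rw [and31_eq_mod]; omega
        rw [or32_eq_add _ ha]
        have : ¬ ((0 : Nat) = Nat.log2 n / 5 + 1 - 1) := by omega
        simp only [Nat.shiftRight_zero, Nat.mul_zero, if_neg this]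
        congr 1; omega
      · -- tail characters
        refine List.map_congr_left (fun i _ => ?_)
        simp only [Function.comp]
        have hsr : n >>> (5 * (i + 1)) = (n >>> 5) >>> (5 * i) := by
          rw [show 5 * (i + 1) = 5 + 5 * i by ring, Nat.shiftRight_add]
        have hiff : (i + 1 = Nat.log2 n / 5 + 1 - 1) ↔ (i = Nat.log2 n / 5 - 1) := by
          omega
        rw [hsr]
        by_cases hc : i = Nat.log2 n / 5 - 1
        · rw [if_pos hc, if_pos (hiff.mpr hc)]
        · rw [if_neg hc, if_neg (fun hx => hc (hiff.mp hx))]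
    · -- n < 32: a single character
      have hK : max 1 ((bitLen n + 4) / 5) = 1 := by
        unfold bitLen
        by_cases h0 : n = 0
        · simp [h0]
        · have hl : Nat.log2 n ≤ 4 := by
            by_contra hc
            have := (Nat.le_log2 h0).mp (by omega : 5 ≤ Nat.log2 n)
            omega
          rw [if_neg h0]; omega
      rw [hK]
      have ha : n &&& 31 = n := by rw [and31_eq_mod]; omega
      unfold encAHelp
      rw [if_neg (by omega)]
      simp [ha]

-- ===== VERDICT (by name: the statement is the Claim_ definition above) =====
theorem encodeNumber_spec : Claim_equal_encodeNumber := by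
  intro num _
  unfold Spec_encodeNumber encodeNumber encodeNumber_alt
  simp only [encAHelp_eq]
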